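-- pv_equiv track=rewrite | github.com/AbhaySrivastava26/careerai | career_matcher.py | normalize_skill
-- ===== SOURCE A (Python) =====
-- def normalize_skill(skill):
--     """Normalize skill names for better matching."""
--     skill_lower = skill.lower().strip()
--
--     # Map variations to canonical names
--     mappings = {
--         "machine learning": ["ml", "machinelearning"],
--         "deep learning": ["dl", "deeplearning"],
--         "artificial intelligence": ["ai"],
--         "natural language processing": ["nlp"],
--         "computer vision": ["cv"],
--         "quality assurance": ["qa"],
--         "continuous integration": ["ci"],
--         "continuous deployment": ["cd"],
--         "rest api": ["restful", "rest"],
--         "nosql": ["mongodb", "cassandra", "dynamodb"],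
--     }
--
--     for canonical, variations in mappings.items():
--         if skill_lower in variations or skill_lower == canonical:
--             return canonical
--
--     return skill_lower
-- ===== SOURCE B (Python) =====
-- # Flat alias/canonical pairs (each canonical also listed for itself), sorted once
-- # alphabetically by alias at module load; lookups then binary-search this table.
-- _TABLE = sorted([
--     ("ml", "machine learning"), ("machinelearning", "machine learning"),
--     ("machine learning", "machine learning"),
--     ("dl", "deep learning"), ("deeplearning", "deep learning"),
--     ("deep learning", "deep learning"),
--     ("ai", "artificial intelligence"),
--     ("artificial intelligence", "artificial intelligence"),
--     ("nlp", "natural language processing"),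
--     ("natural language processing", "natural language processing"),
--     ("cv", "computer vision"), ("computer vision", "computer vision"),
--     ("qa", "quality assurance"), ("quality assurance", "quality assurance"),
--     ("ci", "continuous integration"),
--     ("continuous integration", "continuous integration"),
--     ("cd", "continuous deployment"),
--     ("continuous deployment", "continuous deployment"),
--     ("restful", "rest api"), ("rest", "rest api"), ("rest api", "rest api"),
--     ("mongodb", "nosql"), ("cassandra", "nosql"), ("dynamodb", "nosql"),
--     ("nosql", "nosql"),
-- ], key=lambda p: p[0])
--
--
-- def normalize_skill(skill):
--     """Normalize skill names for better matching."""
--     s = skill.lower().strip()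
--     lo, hi = 0, len(_TABLE)
--     while lo < hi:  # binary search in the sorted table
--         mid = (lo + hi) // 2
--         key, canonical = _TABLE[mid]
--         if key == s:
--             return canonical
--         if key < s:
--             lo = mid + 1
--         else:
--             hi = mid
--     return s
-- ===== Notes on version B (the rewrite author's own statement) =====
-- stated objective: alternative
-- what changed: Replaced A's per-call linear scan over canonical groups (list membership plus equality test per group) by a different algorithm and data structure: a flat (alias, canonical) pair table sorted alphabetically once at module load, searched per call with an iterative binary search; the fallback is the lowercased-stripped input.
import Mathlib
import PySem

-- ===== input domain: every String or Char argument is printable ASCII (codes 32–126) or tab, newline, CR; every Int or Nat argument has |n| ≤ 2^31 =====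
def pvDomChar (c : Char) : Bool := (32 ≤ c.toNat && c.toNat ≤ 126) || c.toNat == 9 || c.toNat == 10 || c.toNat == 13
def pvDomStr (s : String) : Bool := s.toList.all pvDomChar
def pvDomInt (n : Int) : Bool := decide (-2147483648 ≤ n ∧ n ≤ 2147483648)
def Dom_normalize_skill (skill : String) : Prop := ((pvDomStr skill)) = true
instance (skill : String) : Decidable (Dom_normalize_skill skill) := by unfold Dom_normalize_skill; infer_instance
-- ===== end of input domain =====

-- B replaces A's linear scan over canonical groups by a binary search in a table of
-- (alias, canonical) pairs sorted once by alias (objective: alternative algorithm).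


-- ===== PORT A =====
-- A's `mappings` dict literal, in insertion order
def pvMappingsA : List (String × List String) :=
  [("machine learning", ["ml", "machinelearning"]),
   ("deep learning", ["dl", "deeplearning"]),
   ("artificial intelligence", ["ai"]),
   ("natural language processing", ["nlp"]),
   ("computer vision", ["cv"]),
   ("quality assurance", ["qa"]),
   ("continuous integration", ["ci"]),
   ("continuous deployment", ["cd"]),
   ("rest api", ["restful", "rest"]),
   ("nosql", ["mongodb", "cassandra", "dynamodb"])]

-- A's `for canonical, variations in mappings.items(): if skill_lower in variations or skill_lower == canonical: return canonical` loop
def pvScanA (s : String) : List (String × List String) → String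
  | [] => s
  | (canonical, variations) :: rest =>
      if s ∈ variations ∨ s = canonical then canonical else pvScanA s rest

def normalize_skill (skill : String) : String :=
  let skill_lower := PySem.Str.strip (PySem.Str.lower skill)
  pvScanA skill_lower pvMappingsA

-- ===== PORT B =====
-- B's flat alias/canonical pair list literal, in the order written in Source B
def pvPairsB : List (String × String) :=
  [("ml", "machine learning"), ("machinelearning", "machine learning"),
   ("machine learning", "machine learning"),
   ("dl", "deep learning"), ("deeplearning", "deep learning"),
   ("deep learning", "deep learning"),
   ("ai", "artificial intelligence"),
   ("artificial intelligence", "artificial intelligence"),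
   ("nlp", "natural language processing"),
   ("natural language processing", "natural language processing"),
   ("cv", "computer vision"), ("computer vision", "computer vision"),
   ("qa", "quality assurance"), ("quality assurance", "quality assurance"),
   ("ci", "continuous integration"),
   ("continuous integration", "continuous integration"),
   ("cd", "continuous deployment"),
   ("continuous deployment", "continuous deployment"),
   ("restful", "rest api"), ("rest", "rest api"), ("rest api", "rest api"),
   ("mongodb", "nosql"), ("cassandra", "nosql"), ("dynamodb", "nosql"),
   ("nosql", "nosql")]

-- B's `_TABLE = sorted(..., key=lambda p: p[0])`; the string key is compared on the
-- code-point list side (exact: Python orders strings by their code points)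
def pvTable : List (String × String) := PySem.List.sorted pvPairsB (fun p => p.1.toList)

-- B's `while lo < hi:` binary-search loop; the fuel argument only bounds the number of
-- iterations (hi - lo strictly decreases each turn, so fuel = initial hi - lo suffices)
def pvBsearch : Nat → String → Nat → Nat → String
  | 0, s, _, _ => s
  | fuel + 1, s, lo, hi =>
      if lo < hi then
        let mid := (lo + hi) / 2
        match pvTable[mid]? with
        | some (key, canonical) =>
            if key = s then canonical
            else if key.toList < s.toList then pvBsearch fuel s (mid + 1) hi
            else pvBsearch fuel s lo mid
        | none => s
      else s

def normalize_skill_alt (skill : String) : String :=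
  let s := PySem.Str.strip (PySem.Str.lower skill)
  pvBsearch pvTable.length s 0 pvTable.length

-- ===== PRECONDITION & SPEC =====
def Spec_normalize_skill (skill : String) (out : String) : Prop := out = normalize_skill_alt skill
instance (skill : String) (out : String) : Decidable (Spec_normalize_skill skill out) := by unfold Spec_normalize_skill; infer_instance

-- ===== CLAIM (what is proved, stated in full; the proofs are below) =====
def Claim_equal_normalize_skill : Prop := ∀ (skill : String), Dom_normalize_skill skill → Spec_normalize_skill skill (normalize_skill skill)

-- ===== LEMMAS AND PROOFS =====

-- every string occurring as an alias or canonical in the table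
def pvAllKeys : List String :=
  ["ml", "machinelearning", "machine learning", "dl", "deeplearning", "deep learning",
   "ai", "artificial intelligence", "nlp", "natural language processing",
   "cv", "computer vision", "qa", "quality assurance", "ci", "continuous integration",
   "cd", "continuous deployment", "restful", "rest", "rest api",
   "mongodb", "cassandra", "dynamodb", "nosql"]

-- the sorted table, evaluated to its literal value
theorem pvTable_lit : pvTable =
  [("ai", "artificial intelligence"), ("artificial intelligence", "artificial intelligence"),
   ("cassandra", "nosql"), ("cd", "continuous deployment"), ("ci", "continuous integration"),
   ("computer vision", "computer vision"), ("continuous deployment", "continuous deployment"),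
   ("continuous integration", "continuous integration"), ("cv", "computer vision"),
   ("deep learning", "deep learning"), ("deeplearning", "deep learning"), ("dl", "deep learning"),
   ("dynamodb", "nosql"), ("machine learning", "machine learning"),
   ("machinelearning", "machine learning"), ("ml", "machine learning"), ("mongodb", "nosql"),
   ("natural language processing", "natural language processing"),
   ("nlp", "natural language processing"), ("nosql", "nosql"),
   ("qa", "quality assurance"), ("quality assurance", "quality assurance"),
   ("rest", "rest api"), ("rest api", "rest api"), ("restful", "rest api")] := by decide

-- when s is no key of the table, every branch of the binary search falls through to s
theorem pvBsearch_notfound (s : String) (hs : ∀ p ∈ pvTable, p.1 ≠ s) :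
    ∀ fuel lo hi, pvBsearch fuel s lo hi = s := by
  intro fuel
  induction fuel with
  | zero => intro lo hi; rfl
  | succ n ih =>
      intro lo hi
      unfold pvBsearch
      split
      · cases e : pvTable[(lo + hi) / 2]? with
        | none => simp [e]
        | some p =>
            obtain ⟨key, canonical⟩ := p
            have hmem : (key, canonical) ∈ pvTable := List.mem_of_getElem? e
            have hne : key ≠ s := hs _ hmem
            simp [e, hne, ih]
      · rfl

set_option maxHeartbeats 2000000 in
theorem pvScan_eq_bsearch (s : String) :
    pvScanA s pvMappingsA = pvBsearch pvTable.length s 0 pvTable.length := by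
  by_cases h : s ∈ pvAllKeys
  · simp only [pvAllKeys, List.mem_cons, List.not_mem_nil, or_false] at h
    rcases h with rfl|rfl|rfl|rfl|rfl|rfl|rfl|rfl|rfl|rfl|rfl|rfl|rfl|rfl|rfl|rfl|rfl|rfl|rfl|rfl|rfl|rfl|rfl|rfl|rfl <;> decide
  · have hs : ∀ p ∈ pvTable, p.1 ≠ s := by
      rw [pvTable_lit]
      intro p hp
      simp only [pvAllKeys, List.mem_cons, List.not_mem_nil, or_false, not_or] at h
      obtain ⟨h1,h2,h3,h4,h5,h6,h7,h8,h9,h10,h11,h12,h13,h14,h15,h16,h17,h18,h19,h20,h21,h22,h23,h24,h25⟩ := h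
      fin_cases hp <;> simp_all [eq_comm]
    rw [pvBsearch_notfound s hs]
    simp only [pvAllKeys, List.mem_cons, List.not_mem_nil, or_false, not_or] at h
    obtain ⟨h1,h2,h3,h4,h5,h6,h7,h8,h9,h10,h11,h12,h13,h14,h15,h16,h17,h18,h19,h20,h21,h22,h23,h24,h25⟩ := h
    simp [pvScanA, pvMappingsA,
      h1,h2,h3,h4,h5,h6,h7,h8,h9,h10,h11,h12,h13,h14,h15,h16,h17,h18,h19,h20,h21,h22,h23,h24,h25]

-- ===== VERDICT (by name: the statement is the Claim_ definition above) =====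
theorem normalize_skill_spec : Claim_equal_normalize_skill := by
  intro skill _
  unfold Spec_normalize_skill normalize_skill normalize_skill_alt
  exact pvScan_eq_bsearch _
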